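-- pv_equiv track=rewrite | github.com/daalgi/algorithms | recursion/power_set.py | lexicographic
-- ===== SOURCE A (Python) =====
-- def lexicographic(nums: int) -> int:
--     # Lexicographic (Binary sorted) subsets
--     # Map each subset to a bitmask of length `n`,
--     # where `1` on the ith position in bitmask means
--     # the presence of nums[i] in the subset,
--     # and `0` means its absence.
--     n = len(nums)
--     res = []
--
--     # We need integer numbers whose bit representation
--     # goes from 00...00 to 11...11 (n bits)
--     first = 2 ** n  # bin(first) = "0b 100..00" (n 0s)
--                     # bin(first)[3:] = "00..00"
--     last = 2 ** (n + 1)  # bin(last) = "0b1000..00"  (n+1 0s)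
--                          # bin(last)[3:] = "000..00"
--     for i in range(first, last):
--         bitmask = bin(i)[3:]
--         res.append([nums[j] for j in range(n) if bitmask[j] == "1"])
--
--     return res
-- ===== SOURCE B (Python) =====
-- def lexicographic(nums):
--     # Build the power set recursively: subsets of the tail, then the same
--     # subsets each extended with the head (head = most significant bit).
--     if not nums:
--         return [[]]
--     rest = lexicographic(nums[1:])
--     return rest + [[nums[0]] + s for s in rest]
-- ===== Notes on version B (the rewrite author's own statement) =====
-- stated objective: simpler
-- what changed: B builds the power set by structural recursion (subsets of the tail followed by the same subsets with the head prepended) instead of enumerating 2^n integers and decoding each one's binary-string bitmask with an inner index scan.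
import Mathlib
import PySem

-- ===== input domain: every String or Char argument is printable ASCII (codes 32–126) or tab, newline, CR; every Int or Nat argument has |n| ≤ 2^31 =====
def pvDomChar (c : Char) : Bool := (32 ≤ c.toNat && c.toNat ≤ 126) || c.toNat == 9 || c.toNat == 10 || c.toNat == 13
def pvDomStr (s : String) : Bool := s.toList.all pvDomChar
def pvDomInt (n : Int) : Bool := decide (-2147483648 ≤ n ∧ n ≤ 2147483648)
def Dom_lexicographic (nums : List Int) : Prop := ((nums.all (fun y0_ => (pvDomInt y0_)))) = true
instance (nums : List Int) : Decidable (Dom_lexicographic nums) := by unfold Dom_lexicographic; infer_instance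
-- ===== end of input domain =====

-- B replaces A's integer-to-bitmask-string decoding loop with a structural
-- recursion that doubles the subset list once per element (objective: simpler).

-- ===== PORT A =====
-- bin(i) without the "0b" prefix, as a list of chars (MSB first); bin is only
-- ever called on i ≥ 1 in A, where this is exact.
def binDigits (i : Nat) : List Char :=
  if h0 : i = 0 then []
  else binDigits (i / 2) ++ [if i % 2 = 1 then '1' else '0']
decreasing_by exact Nat.div_lt_self (Nat.pos_of_ne_zero h0) (by omega)

-- literal transliteration of A: for i in range(2**n, 2**(n+1)) build the
-- bitmask string bin(i)[3:] and collect nums[j] where the bitmask has '1'.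
-- Indexing nums[j] / bitmask[j] is always in range here, so pyGetD is exact.
def lexicographic (nums : List Int) : List (List Int) :=
  let n := nums.length
  let first : Int := 2 ^ n
  let last : Int := 2 ^ (n + 1)
  (PySem.List.pyRange first last 1).foldl (fun res i =>
    res ++ [((PySem.List.pyRange 0 (n : Int) 1).foldl (fun sub j =>
      if PySem.List.pyGetD ((binDigits i.toNat).drop 1) j ' ' = '1' then
        sub ++ [PySem.List.pyGetD nums j 0]
      else sub) [])]) []

-- ===== PORT B =====
def lexicographic_alt : List Int → List (List Int)
  | [] => [[]]
  | x :: xs =>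
    let rest := lexicographic_alt xs
    rest ++ rest.map (fun s => x :: s)

-- ===== PRECONDITION & SPEC =====
def Spec_lexicographic (nums : List Int) (out : List (List Int)) : Prop := out = lexicographic_alt nums
instance (nums : List Int) (out : List (List Int)) : Decidable (Spec_lexicographic nums out) := by unfold Spec_lexicographic; infer_instance

-- ===== CLAIM (what is proved, stated in full; the proofs are below) =====
def Claim_equal_lexicographic : Prop := ∀ (nums : List Int), Dom_lexicographic nums → Spec_lexicographic nums (lexicographic nums)

-- ===== LEMMAS AND PROOFS =====

-- n-bit binary representation of k (k < 2^n), MSB first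
def padBits : Nat → Nat → List Char
  | 0, _ => []
  | n + 1, k => padBits n (k / 2) ++ [if k % 2 = 1 then '1' else '0']

-- elements of nums selected by the mask ('1' = keep), positionwise
def select : List Int → List Char → List Int
  | x :: xs, c :: cs => if c = '1' then x :: select xs cs else select xs cs
  | _, _ => []

theorem padBits_length (n k : Nat) : (padBits n k).length = n := by
  induction n generalizing k with
  | zero => rfl
  | succ n ih => simp [padBits, ih]

theorem binDigits_two_pow_add (n k : Nat) (hk : k < 2 ^ n) :
    binDigits (2 ^ n + k) = '1' :: padBits n k := by
  induction n generalizing k with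
  | zero =>
    interval_cases k
    simp [binDigits, padBits]
  | succ n ih =>
    have hp : (2:Nat) ^ (n+1) = 2 * 2 ^ n := by ring
    rw [binDigits]
    have h1 : ¬ (2 ^ (n+1) + k = 0) := by positivity
    simp only [h1, dite_false]
    have h2 : (2 ^ (n+1) + k) / 2 = 2 ^ n + k / 2 := by omega
    have h3 : (2 ^ (n+1) + k) % 2 = k % 2 := by omega
    rw [h2, h3, ih (k / 2) (by omega)]
    rfl

theorem padBits_split (n k : Nat) (hk : k < 2 ^ (n + 1)) :
    padBits (n + 1) k =
      (if k < 2 ^ n then '0' :: padBits n k else '1' :: padBits n (k - 2 ^ n)) := by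
  induction n generalizing k with
  | zero =>
    interval_cases k <;> decide
  | succ n ih =>
    have hp : (2:Nat) ^ (n+1) = 2 * 2 ^ n := by ring
    have hp2 : (2:Nat) ^ (n+2) = 2 * 2 ^ (n+1) := by ring
    show padBits (n + 1) (k / 2) ++ _ = _
    rw [ih (k / 2) (by omega)]
    by_cases hc : k < 2 ^ (n + 1)
    · have : k / 2 < 2 ^ n := by omega
      simp only [this, if_true, hc, if_true]
      rfl
    · have h1 : ¬ (k / 2 < 2 ^ n) := by omega
      simp only [h1, if_false, hc, if_false]
      have h2 : k / 2 - 2 ^ n = (k - 2 ^ (n + 1)) / 2 := by omega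
      have h3 : k % 2 = (k - 2 ^ (n + 1)) % 2 := by omega
      rw [h2]
      show _ = '1' :: (padBits n ((k - 2^(n+1)) / 2) ++ [if (k - 2^(n+1)) % 2 = 1 then '1' else '0'])
      rw [← h3]
      simp

theorem inner_loop (nums : List Int) (mask : List Char) (acc : List Int)
    (h : mask.length = nums.length) :
    (List.range nums.length).foldl
      (fun sub k => if mask.getD k ' ' = '1' then sub ++ [nums.getD k 0] else sub) acc
      = acc ++ select nums mask := by
  induction nums generalizing mask acc with
  | nil =>
    cases mask with
    | nil => simp [select]
    | cons c cs => simp at h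
  | cons x xs ih =>
    cases mask with
    | nil => simp at h
    | cons c cs =>
      simp only [List.length_cons, List.range_succ_eq_map, List.foldl_cons, List.foldl_map,
        List.getD_cons_succ, List.getD_cons_zero]
      rw [ih cs _ (by simpa using h)]
      by_cases hc : c = '1'
      · simp [select, hc]
      · simp [select, hc]

-- A's fold, rewritten as a map of decoded bitmasks over range(2^n)
theorem lexicographic_eq_map (nums : List Int) :
    lexicographic nums
      = (List.range (2 ^ nums.length)).map
          (fun k => select nums (padBits nums.length k)) := by
  have hlen : ((2:Int) ^ (nums.length + 1) - 2 ^ nums.length).toNat = 2 ^ nums.length := by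
    have h1 : (2:Int) ^ (nums.length + 1) - 2 ^ nums.length
        = (((2:Nat) ^ nums.length : Nat) : Int) := by push_cast; ring
    rw [h1, Int.toNat_natCast]
  unfold lexicographic
  rw [PySem.List.foldl_append_singleton_eq_map, List.nil_append]
  rw [PySem.List.pyRange_one, PySem.List.pyRange_one]
  rw [List.map_map, hlen]
  have hn : ((nums.length : Int) - 0).toNat = nums.length := by omega
  rw [hn]
  apply List.map_congr_left
  intro k hk
  rw [List.mem_range] at hk
  simp only [Function.comp_apply]
  have htn : ((2:Int) ^ nums.length + (k : Int)).toNat = 2 ^ nums.length + k := by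
    have h2 : (2:Int) ^ nums.length + (k : Int) = (((2:Nat) ^ nums.length + k : Nat) : Int) := by
      push_cast; ring
    rw [h2, Int.toNat_natCast]
  rw [htn, binDigits_two_pow_add nums.length k hk, List.drop_one, List.tail_cons]
  rw [List.foldl_map]
  have hbody : ∀ (sub : List Int) (j : Nat),
      (if PySem.List.pyGetD (padBits nums.length k) ((0:Int) + (j:Int)) ' ' = '1' then
        sub ++ [PySem.List.pyGetD nums ((0:Int) + (j:Int)) 0] else sub)
      = (if (padBits nums.length k).getD j ' ' = '1' then sub ++ [nums.getD j 0] else sub) := by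
    intro sub j
    simp
  simp only [hbody]
  rw [inner_loop nums (padBits nums.length k) [] (padBits_length _ _)]
  simp

theorem map_padBits_eq_alt (nums : List Int) :
    (List.range (2 ^ nums.length)).map
        (fun k => select nums (padBits nums.length k))
      = lexicographic_alt nums := by
  induction nums with
  | nil => decide
  | cons x xs ih =>
    have hsplit : (2:Nat) ^ (xs.length + 1) = 2 ^ xs.length + 2 ^ xs.length := by ring
    simp only [List.length_cons, hsplit, List.range_add, List.map_append, List.map_map]
    have h1 : ∀ k ∈ List.range (2 ^ xs.length),
        select (x :: xs) (padBits (xs.length + 1) k) = select xs (padBits xs.length k) := by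
      intro k hk
      rw [List.mem_range] at hk
      rw [padBits_split xs.length k (by omega)]
      simp [hk, select]
    have h2 : ∀ k ∈ List.range (2 ^ xs.length),
        select (x :: xs) (padBits (xs.length + 1) (2 ^ xs.length + k))
          = x :: select xs (padBits xs.length k) := by
      intro k hk
      rw [List.mem_range] at hk
      rw [padBits_split xs.length (2 ^ xs.length + k) (by omega)]
      have : ¬ (2 ^ xs.length + k < 2 ^ xs.length) := by omega
      simp [this, select]
    have h2' : ∀ k ∈ List.range (2 ^ xs.length),
        ((fun k => select (x :: xs) (padBits (xs.length + 1) k)) ∘ fun k => 2 ^ xs.length + k) k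
          = x :: select xs (padBits xs.length k) := by
      intro k hk
      simp only [Function.comp_apply]
      exact h2 k hk
    rw [List.map_congr_left h1, List.map_congr_left h2']
    simp only [lexicographic_alt]
    rw [← ih, List.map_map]
    rfl

-- ===== VERDICT (by name: the statement is the Claim_ definition above) =====
theorem lexicographic_spec : Claim_equal_lexicographic := by
  intro nums _
  unfold Spec_lexicographic
  rw [lexicographic_eq_map, map_padBits_eq_alt]
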